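-- pv_equiv track=rewrite | github.com/duber000/race-to-the-crystal | game/generator.py | _find_dominant_player
-- ===== SOURCE A (Python) =====
-- from typing import Optional, List, Tuple
--
-- def _find_dominant_player(player_token_counts: dict[str, List[int]]) -> Tuple[Optional[str], int]:
--     """
--     Determine which player has the most tokens, if any.
--
--     Args:
--         player_token_counts: Dictionary mapping player_id to token_ids
--
--     Returns:
--         Tuple of (dominant_player_id, token_count). Returns (None, count) if contested.
--     """
--     dominant_player: Optional[str] = None
--     dominant_count = 0
--
--     for player_id, token_ids in player_token_counts.items():
--         if len(token_ids) > dominant_count: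
--             dominant_player = player_id
--             dominant_count = len(token_ids)
--         elif len(token_ids) == dominant_count and dominant_count > 0:
--             dominant_player = None  # Contested
--
--     return (dominant_player, dominant_count)
-- ===== SOURCE B (Python) =====
-- from typing import Optional, List, Tuple
--
-- def _find_dominant_player(player_token_counts: dict[str, List[int]]) -> Tuple[Optional[str], int]:
--     counts = {p: len(t) for p, t in player_token_counts.items()}
--     maxc = max(counts.values(), default=0)
--     winners = [p for p, c in counts.items() if c == maxc]
--     if maxc > 0 and len(winners) == 1:
--         return (winners[0], maxc)
--     return (None, maxc)
-- ===== Notes on version B (the rewrite author's own statement) =====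
-- stated objective: simpler
-- what changed: Replaces A's single conditional-tracking scan (running champion reset to None on ties) by a two-pass find-max-then-collect-winners structure: take the maximum count, list all attainers, and return the player only if the count is positive and the attainer is unique.
import Mathlib
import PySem

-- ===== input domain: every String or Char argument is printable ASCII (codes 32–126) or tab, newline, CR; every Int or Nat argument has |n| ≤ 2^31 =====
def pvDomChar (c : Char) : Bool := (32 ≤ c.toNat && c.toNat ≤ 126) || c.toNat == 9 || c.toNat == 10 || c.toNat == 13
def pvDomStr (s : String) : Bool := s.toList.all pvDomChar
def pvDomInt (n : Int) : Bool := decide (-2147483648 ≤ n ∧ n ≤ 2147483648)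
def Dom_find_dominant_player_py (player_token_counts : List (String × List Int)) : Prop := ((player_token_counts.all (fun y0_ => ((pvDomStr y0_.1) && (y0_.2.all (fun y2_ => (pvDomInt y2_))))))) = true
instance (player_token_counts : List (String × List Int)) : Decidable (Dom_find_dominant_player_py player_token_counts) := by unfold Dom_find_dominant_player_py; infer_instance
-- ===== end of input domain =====

-- B swaps A's single conditional-tracking scan for a find-max-then-collect-winners two-pass structure (objective: simpler).

-- ===== PORT A =====
def find_dominant_player_py (player_token_counts : List (String × List Int)) : Option String × Int :=
  player_token_counts.foldl
    (fun (st : Option String × Int) pt =>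
      if ((pt.2.length : Int)) > st.2 then (some pt.1, (pt.2.length : Int))
      else if ((pt.2.length : Int)) = st.2 ∧ st.2 > 0 then (none, st.2)
      else st)
    (none, 0)

-- ===== PORT B =====
def find_dominant_player_py_alt (player_token_counts : List (String × List Int)) : Option String × Int :=
  let counts := player_token_counts.map (fun pt => (pt.1, (pt.2.length : Int)))
  let maxc := (counts.map Prod.snd).foldl max 0
  let winners := (counts.filter (fun pc => pc.2 == maxc)).map Prod.fst
  if maxc > 0 ∧ winners.length = 1 then (winners.head?, maxc) else (none, maxc)

-- ===== PRECONDITION & SPEC =====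
def Spec_find_dominant_player_py (player_token_counts : List (String × List Int)) (out : Option String × Int) : Prop := out = find_dominant_player_py_alt player_token_counts
instance (player_token_counts : List (String × List Int)) (out : Option String × Int) : Decidable (Spec_find_dominant_player_py player_token_counts out) := by unfold Spec_find_dominant_player_py; infer_instance

-- ===== CLAIM (what is proved, stated in full; the proofs are below) =====
def Claim_equal_find_dominant_player_py : Prop := ∀ (player_token_counts : List (String × List Int)), Dom_find_dominant_player_py player_token_counts → Spec_find_dominant_player_py player_token_counts (find_dominant_player_py player_token_counts)

-- ===== LEMMAS AND PROOFS =====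

def pvM (l : List (String × List Int)) : Int :=
  (l.map (fun pt => ((pt.2).length : Int))).foldl max 0

def pvW (l : List (String × List Int)) : List String :=
  (l.filter (fun pt => ((pt.2).length : Int) == pvM l)).map Prod.fst

theorem pvB_char (l : List (String × List Int)) :
    find_dominant_player_py_alt l =
      if 0 < pvM l ∧ (pvW l).length = 1 then ((pvW l).head?, pvM l) else (none, pvM l) := by
  simp only [find_dominant_player_py_alt, List.map_map, List.filter_map, pvM, pvW,
    Function.comp_def, gt_iff_lt]

theorem pv_foldl_max_attained (xs : List Int) (a : Int) :
    xs.foldl max a = a ∨ xs.foldl max a ∈ xs := by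
  induction xs generalizing a with
  | nil => left; rfl
  | cons x xs ih =>
    simp only [List.foldl_cons]
    rcases ih (max a x) with h | h
    · rcases max_choice a x with hm | hm
      · left; rw [h, hm]
      · right; rw [h, hm]; exact List.mem_cons_self
    · right; exact List.mem_cons_of_mem _ h

theorem pvA_char (l : List (String × List Int)) :
    find_dominant_player_py l =
      (if 0 < pvM l ∧ (pvW l).length = 1 then (pvW l).head? else none, pvM l) := by
  induction l using List.reverseRecOn with
  | nil => simp [find_dominant_player_py, pvM, pvW]
  | append_singleton l x ih =>
    have hM : pvM (l ++ [x]) = max (pvM l) ((x.2.length : Int)) := by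
      simp [pvM, List.foldl_append]
    have h0 : 0 ≤ pvM l := (PySem.List.le_foldl_max _ _).1
    have hA : find_dominant_player_py (l ++ [x]) =
        (fun (st : Option String × Int) pt =>
          if ((pt.2.length : Int)) > st.2 then (some pt.1, (pt.2.length : Int))
          else if ((pt.2.length : Int)) = st.2 ∧ st.2 > 0 then (none, st.2)
          else st) (find_dominant_player_py l) x := by
      simp [find_dominant_player_py, List.foldl_append]
    rcases lt_trichotomy (pvM l) ((x.2.length : Int)) with hlt | heq | hgt
    · -- new strict maximum
      have hM' : pvM (l ++ [x]) = ((x.2.length : Int)) := by rw [hM]; omega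
      have hfilt : l.filter (fun pt => ((pt.2).length : Int) == ((x.2.length : Int))) = [] := by
        apply List.filter_eq_nil_iff.mpr
        intro pt hpt
        have hle : ((pt.2).length : Int) ≤ pvM l :=
          (PySem.List.le_foldl_max _ _).2 _ (List.mem_map.mpr ⟨pt, hpt, rfl⟩)
        simp; omega
      have hW' : pvW (l ++ [x]) = [x.1] := by
        simp [pvW, List.filter_append, hM', hfilt]
      rw [hA, ih, hM', hW']
      dsimp only
      rw [if_pos (show ((x.2.length : Int)) > pvM l from hlt),
          if_pos (show (0:Int) < ((x.2.length : Int)) ∧ ([x.1].length = 1) from ⟨by omega, rfl⟩)]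
      rfl
    · -- tie with the running maximum
      have hM' : pvM (l ++ [x]) = pvM l := by rw [hM]; omega
      rw [hA, ih]
      by_cases hpos : 0 < pvM l
      · -- positive tie: contested
        have hattain : pvM l ∈ l.map (fun pt => ((pt.2).length : Int)) := by
          rcases pv_foldl_max_attained (l.map (fun pt => ((pt.2).length : Int))) 0 with h | h
          · exfalso; rw [pvM] at hpos; omega
          · exact h
        rcases List.mem_map.mp hattain with ⟨pt, hpt, hpteq⟩
        have hWl_ne : pvW l ≠ [] := by
          simp only [pvW, ne_eq, List.map_eq_nil_iff, List.filter_eq_nil_iff]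
          intro hno
          exact absurd (by simp [hpteq]) (hno pt hpt)
        have hWlpos : 1 ≤ (pvW l).length := List.length_pos_iff.mpr hWl_ne
        have hW' : pvW (l ++ [x]) = pvW l ++ [x.1] := by
          simp [pvW, List.filter_append, hM', ← heq]
        rw [hM', hW']
        dsimp only
        rw [if_neg (show ¬ ((x.2.length : Int)) > pvM l by omega),
            if_pos (show ((x.2.length : Int)) = pvM l ∧ pvM l > 0 from ⟨heq.symm, hpos⟩),
            if_neg (show ¬ (0 < pvM l ∧ (pvW l ++ [x.1]).length = 1) by
              intro hcon; rcases hcon with ⟨-, hlen⟩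
              simp only [List.length_append, List.length_cons, List.length_nil] at hlen
              omega)]
      · -- zero tie: nothing changes
        rw [hM']
        dsimp only
        rw [if_neg (show ¬ ((x.2.length : Int)) > pvM l by omega),
            if_neg (show ¬ (((x.2.length : Int)) = pvM l ∧ pvM l > 0) by omega),
            if_neg (show ¬ (0 < pvM l ∧ (pvW l).length = 1) from fun h => hpos h.1),
            if_neg (show ¬ (0 < pvM l ∧ (pvW (l ++ [x])).length = 1) from fun h => hpos h.1)]
    · -- smaller count: nothing changes
      have hM' : pvM (l ++ [x]) = pvM l := by rw [hM]; omega
      have hbeq : (((x.2.length : Int)) == pvM l) = false := beq_eq_false_iff_ne.mpr (by omega)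
      have hW' : pvW (l ++ [x]) = pvW l := by
        simp [pvW, List.filter_append, hM', hbeq]
      rw [hA, ih, hM', hW']
      dsimp only
      rw [if_neg (show ¬ ((x.2.length : Int)) > pvM l by omega),
          if_neg (show ¬ (((x.2.length : Int)) = pvM l ∧ pvM l > 0) by omega)]

-- ===== VERDICT (by name: the statement is the Claim_ definition above) =====
theorem find_dominant_player_py_spec : Claim_equal_find_dominant_player_py := by
  intro l _
  unfold Spec_find_dominant_player_py
  rw [pvA_char, pvB_char]
  split <;> rfl
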